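-- pv_equiv track=rewrite | github.com/lindlorian/Python-Tools | Selenium/Support/ScreenshotSupport/ScreenshotHelper.py | escape_chars
-- ===== SOURCE A (Python) =====
-- def escape_chars(text):
--     esc_chars = "@'[]"
--     convert_chars = "/="
--     for char in esc_chars:
--         if char in text:
--             text = text.replace(char, "")
--     for char in convert_chars:
--         if char in text:
--             text = text.replace(char, "_")
--     return text
-- ===== SOURCE B (Python) =====
-- _REMOVE = {'@', "'", '[', ']'}
-- _CONVERT = {'/': '_', '=': '_'}
--
-- def escape_chars(text):
--     return ''.join('' if c in _REMOVE else _CONVERT.get(c, c) for c in text)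
-- ===== Notes on version B (the rewrite author's own statement) =====
-- stated objective: idiomatic
-- what changed: Replaces A's six sequential full-string .replace scans with one single pass over the characters using a remove-set and a convert-dict built once.
import Mathlib
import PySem

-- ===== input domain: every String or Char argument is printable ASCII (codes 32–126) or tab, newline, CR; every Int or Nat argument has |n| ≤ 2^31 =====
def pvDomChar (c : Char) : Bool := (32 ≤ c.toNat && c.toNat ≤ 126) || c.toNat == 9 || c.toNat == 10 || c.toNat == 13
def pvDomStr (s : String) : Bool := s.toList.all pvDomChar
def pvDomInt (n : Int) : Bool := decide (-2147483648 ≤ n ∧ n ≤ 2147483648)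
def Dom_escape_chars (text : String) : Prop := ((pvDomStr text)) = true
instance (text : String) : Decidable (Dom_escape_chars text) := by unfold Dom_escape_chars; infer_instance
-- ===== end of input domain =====

-- ===== PORT A =====
-- B does the same character cleanup in one pass with a remove-set and convert-dict instead of A's six sequential .replace scans (idiomatic; same cost class).
-- A: for char in "@'[]": if char in text: text = text.replace(char, "")
--    for char in "/=":   if char in text: text = text.replace(char, "_")
def escape_chars (text : String) : String :=
  let t1 := ['@', '\'', '[', ']'].foldl
    (fun t c => if PySem.Chars.isIn [c] t then PySem.Chars.replace t [c] [] else t) text.toList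
  let t2 := ['/', '='].foldl
    (fun t c => if PySem.Chars.isIn [c] t then PySem.Chars.replace t [c] ['_'] else t) t1
  String.ofList t2

-- ===== PORT B =====
def pvRemove : PySem.Set Char := PySem.Set.ofList ['@', '\'', '[', ']']
def pvConvert : PySem.Dict Char (List Char) := PySem.Dict.ofList [('/', ['_']), ('=', ['_'])]
-- ''.join(pieces) on these per-char pieces is exactly their concatenation (PySem.Chars.join_nil)
def escape_chars_alt (text : String) : String :=
  String.ofList ((text.toList.map
    (fun c => if PySem.Set.contains pvRemove c then [] else pvConvert.getD c [c])).flatten)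

-- ===== PRECONDITION & SPEC =====
def Spec_escape_chars (text : String) (out : String) : Prop := out = escape_chars_alt text
instance (text : String) (out : String) : Decidable (Spec_escape_chars text out) := by unfold Spec_escape_chars; infer_instance

-- ===== CLAIM (what is proved, stated in full; the proofs are below) =====
def Claim_equal_escape_chars : Prop := ∀ (text : String), Dom_escape_chars text → Spec_escape_chars text (escape_chars text)

-- ===== LEMMAS AND PROOFS =====

-- per-character action of replacing the character c by `new`
def pvRep (c : Char) (new : List Char) : Char → List Char :=
  fun x => if x = c then new else [x]

theorem pvgo_eq (c : Char) (new : List Char) :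
    ∀ (l : List Char) (fuel : Nat) (acc : List Char), l.length ≤ fuel →
      PySem.Chars.replace.go [c] new fuel l acc = acc.reverse ++ l.flatMap (pvRep c new) := by
  intro l
  induction l with
  | nil =>
    intro fuel acc _
    cases fuel <;> simp [PySem.Chars.replace.go]
  | cons x t ih =>
    intro fuel acc hle
    simp only [List.length_cons] at hle
    cases fuel with
    | zero => omega
    | succ n =>
      rw [PySem.Chars.replace.go]
      by_cases hx : c = x
      · subst hx
        rw [if_pos (by simp [List.isPrefixOf])]
        rw [show List.drop [c].length (c :: t) = t from rfl]
        rw [ih n (new.reverse ++ acc) (by omega)]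
        simp [pvRep]
      · rw [if_neg (by simp [List.isPrefixOf, hx])]
        rw [ih n (x :: acc) (by omega)]
        have hx' : x ≠ c := fun h => hx h.symm
        simp [pvRep, hx']

theorem pvreplace_single (c : Char) (new l : List Char) :
    PySem.Chars.replace l [c] new = l.flatMap (pvRep c new) := by
  rw [PySem.Chars.replace]
  rw [if_neg (by simp)]
  exact pvgo_eq c new l l.length [] le_rfl

theorem pvstep (c : Char) (new l : List Char) :
    (if PySem.Chars.isIn [c] l then PySem.Chars.replace l [c] new else l)
      = l.flatMap (pvRep c new) := by
  split
  · exact pvreplace_single c new l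
  · next h =>
    have hnotmem : c ∉ l := by
      intro hc
      exact h ((PySem.Chars.isIn_iff_infix [c] l).mpr ((List.singleton_infix_iff c l).mpr hc))
    rw [List.flatMap_congr (g := fun x => [x]) (fun x hx => by
      have : x ≠ c := fun h' => hnotmem (h' ▸ hx)
      simp [pvRep, this])]
    simp

-- ===== VERDICT (by name: the statement is the Claim_ definition above) =====
theorem escape_chars_spec : Claim_equal_escape_chars := by
  intro text _
  unfold Spec_escape_chars escape_chars escape_chars_alt
  simp only [List.foldl_cons, List.foldl_nil, pvstep]
  rw [← List.flatMap_def]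
  simp only [List.flatMap_assoc]
  congr 1
  apply List.flatMap_congr
  intro x _
  by_cases h1 : x = '@'
  · subst h1; decide
  by_cases h2 : x = '\''
  · subst h2; decide
  by_cases h3 : x = '['
  · subst h3; decide
  by_cases h4 : x = ']'
  · subst h4; decide
  by_cases h5 : x = '/'
  · subst h5; decide
  by_cases h6 : x = '='
  · subst h6; decide
  have e5 : ('/' == x) = false := by simp [Ne.symm h5]
  have e6 : ('=' == x) = false := by simp [Ne.symm h6]
  simp [pvRep, h1, h2, h3, h4, h5, h6, e5, e6, pvRemove, pvConvert, PySem.Set.ofList,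
    PySem.Set.add, PySem.Set.contains, PySem.Dict.ofList, PySem.Dict.update,
    PySem.Dict.insert, PySem.Dict.getD, PySem.Dict.get?, PySem.Dict.empty,
    PySem.Dict.contains, List.find?]
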